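-- pv_equiv track=rewrite | github.com/fzjawed/Swap-Consecutive-Index-Pairs | Swap-Consecutive-Index-Unaccepted.py | solve
-- ===== SOURCE A (Python) =====
-- def solve(nums):
--     visited = []
--     for i in range(len(nums)):
--         for j in range(i+1,len(nums)):
--             if (i % 2 == 0) and (j % 2 == 0) and i not in visited and j not in visited:
--                 nums[i], nums[j] = nums[j], nums[i]
--                 visited.append(i)
--                 visited.append(j)
--             elif (i % 2 != 0) and (j % 2 != 0) and i not in visited and j not in visited:
--                 nums[i], nums[j] = nums[j], nums[i]
--                 visited.append(i)
--                 visited.append(j)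
--     return nums
-- ===== SOURCE B (Python) =====
-- def solve(nums):
--     # O(n): rebuild in 4-chunks [a,b,c,d] -> [c,d,a,b]; a 3-chunk tail -> [c,b,a];
--     # shorter tails unchanged. Mutates nums in place like A and returns it.
--     out = []
--     for k in range(0, len(nums), 4):
--         chunk = nums[k:k+4]
--         if len(chunk) == 4:
--             out += [chunk[2], chunk[3], chunk[0], chunk[1]]
--         elif len(chunk) == 3:
--             out += [chunk[2], chunk[1], chunk[0]]
--         else:
--             out += chunk
--     nums[:] = out
--     return nums
-- ===== Notes on version B (the rewrite author's own statement) =====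
-- stated objective: faster
-- what changed: Replaced the O(n^3) double loop with a visited-list membership scan by a single pass over 4-element chunks that emits [c,d,a,b] per chunk ([c,b,a] for a 3-element tail), with no visited bookkeeping.
import Mathlib
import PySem

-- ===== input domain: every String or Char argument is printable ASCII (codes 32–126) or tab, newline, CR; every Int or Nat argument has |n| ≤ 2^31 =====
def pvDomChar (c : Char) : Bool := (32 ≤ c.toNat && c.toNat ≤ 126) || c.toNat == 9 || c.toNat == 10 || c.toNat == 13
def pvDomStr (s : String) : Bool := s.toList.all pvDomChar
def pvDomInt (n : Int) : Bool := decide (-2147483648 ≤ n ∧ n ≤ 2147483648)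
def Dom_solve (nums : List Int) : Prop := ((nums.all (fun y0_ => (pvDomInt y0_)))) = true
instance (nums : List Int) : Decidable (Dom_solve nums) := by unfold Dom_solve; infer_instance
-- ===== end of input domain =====

-- B replaces A's cubic double loop with a visited list by one pass over 4-element chunks (asymptotic speed-up).
-- A mutates its argument in place (B's Python mimics that); the equivalence proved here is about the return value.

-- ===== PORT A =====
-- nums[i], nums[j] = nums[j], nums[i]  (here always 0 ≤ i < j < len, so plain getD/set is exact)
def pySwap (l : List Int) (i j : Nat) : List Int :=
  let vi := l.getD i 0
  let vj := l.getD j 0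
  (l.set i vj).set j vi

-- one inner-loop step: the if/elif/else body for given i, state (nums, visited)
def stepA (i : Nat) (st : List Int × List Nat) (j : Nat) : List Int × List Nat :=
  if i % 2 = 0 ∧ j % 2 = 0 ∧ i ∉ st.2 ∧ j ∉ st.2 then
    (pySwap st.1 i j, st.2 ++ [i, j])
  else if i % 2 ≠ 0 ∧ j % 2 ≠ 0 ∧ i ∉ st.2 ∧ j ∉ st.2 then
    (pySwap st.1 i j, st.2 ++ [i, j])
  else st

-- the two nested for-loops, n = len(nums) fixed throughout
def outerA (n : Nat) (st : List Int × List Nat) (is_ : List Nat) : List Int × List Nat :=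
  is_.foldl (fun st i => (List.range' (i+1) (n - (i+1))).foldl (stepA i) st) st

def solve (nums : List Int) : List Int :=
  (outerA nums.length (nums, []) (List.range nums.length)).1

-- ===== PORT B =====
-- one pass over 4-chunks: [a,b,c,d]++rest -> [c,d,a,b]++…, a 3-element tail -> [c,b,a], shorter tail unchanged
def solve_alt (nums : List Int) : List Int :=
  match nums with
  | a :: b :: c :: d :: rest => c :: d :: a :: b :: solve_alt rest
  | [a, b, c] => [c, b, a]
  | other => other

-- ===== PRECONDITION & SPEC =====
def Spec_solve (nums : List Int) (out : List Int) : Prop := out = solve_alt nums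
instance (nums : List Int) (out : List Int) : Decidable (Spec_solve nums out) := by unfold Spec_solve; infer_instance

-- ===== CLAIM (what is proved, stated in full; the proofs are below) =====
def Claim_equal_solve : Prop := ∀ (nums : List Int), Dom_solve nums → Spec_solve nums (solve nums)

-- ===== LEMMAS AND PROOFS =====

-- once i is in visited, the rest of the inner loop does nothing
lemma inner_id (i : Nat) : ∀ (b a : Nat) (st : List Int × List Nat), i ∈ st.2 →
    (List.range' a b).foldl (stepA i) st = st := by
  intro b
  induction b with
  | zero => intro a st _; rfl
  | succ b ih =>
    intro a st hi
    rw [List.range'_succ, List.foldl_cons]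
    have : stepA i st a = st := by
      unfold stepA
      rw [if_neg, if_neg]
      · rintro ⟨-, -, h, -⟩; exact h hi
      · rintro ⟨-, -, h, -⟩; exact h hi
    rw [this]
    exact ih _ _ hi

lemma stepA_skip (i j : Nat) (st : List Int × List Nat)
    (h1 : ¬ (i % 2 = 0 ∧ j % 2 = 0)) (h2 : ¬ (i % 2 ≠ 0 ∧ j % 2 ≠ 0)) : stepA i st j = st := by
  unfold stepA
  rw [if_neg, if_neg]
  · rintro ⟨a1, a2, -, -⟩; exact h2 ⟨a1, a2⟩
  · rintro ⟨a1, a2, -, -⟩; exact h1 ⟨a1, a2⟩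

lemma stepA_swap (i j : Nat) (st : List Int × List Nat)
    (hp : i % 2 = j % 2) (hi : i ∉ st.2) (hj : j ∉ st.2) :
    stepA i st j = (pySwap st.1 i j, st.2 ++ [i, j]) := by
  unfold stepA
  by_cases he : i % 2 = 0
  · rw [if_pos ⟨he, hp ▸ he, hi, hj⟩]
  · rw [if_neg, if_pos ⟨he, hp ▸ he, hi, hj⟩]
    rintro ⟨a1, -, -, -⟩; exact he a1

-- swapping at offset p.length acts inside the suffix
lemma pySwap_shift : ∀ (p t : List Int) (i j : Nat),
    pySwap (p ++ t) (p.length + i) (p.length + j) = p ++ pySwap t i j := by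
  intro p
  induction p with
  | nil => intro t i j; simp [pySwap]
  | cons x p ih =>
    intro t i j
    have h1 : (x :: p).length + i = (p.length + i) + 1 := by simp [Nat.add_right_comm]
    have h2 : (x :: p).length + j = (p.length + j) + 1 := by simp [Nat.add_right_comm]
    simp only [List.cons_append, pySwap, h1, h2, List.getD_cons_succ, List.set_cons_succ]
    have := ih t i j
    simp only [pySwap] at this
    rw [this]

-- the outer loop from an even offset q = p.length, with visited = {0,…,q-1}, rewrites the suffix by solve_alt
lemma mainA : ∀ (m : Nat) (t p : List Int) (v : List Nat) (q : Nat), t.length = m →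
    q = p.length → q % 2 = 0 → (∀ x, x ∈ v ↔ x < q) →
    outerA (q + t.length) (p ++ t, v) (List.range' q t.length)
      = (p ++ solve_alt t, (outerA (q + t.length) (p ++ t, v) (List.range' q t.length)).2) := by
  intro m
  induction m using Nat.strong_induction_on with
  | _ m ih =>
    intro t p v q hm hq hpar hv
    have hm0 : q ∉ v := fun h => absurd ((hv _).mp h) (by omega)
    have hm2 : q + 2 ∉ v := fun h => absurd ((hv _).mp h) (by omega)
    match t with
    | [] => simp [outerA, solve_alt]
    | [a] =>
      simp only [List.length_cons, List.length_nil]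
      rw [show List.range' q 1 = [q] from rfl]
      simp only [outerA, List.foldl_cons, List.foldl_nil]
      rw [show q + 1 - (q + 1) = 0 from by omega, List.range'_zero, List.foldl_nil]
      simp [solve_alt]
    | [a, b] =>
      simp only [List.length_cons, List.length_nil]
      rw [show List.range' q 2 = [q, q+1] from rfl]
      simp only [outerA, List.foldl_cons, List.foldl_nil]
      rw [show q + 2 - (q + 1) = 1 from by omega,
        show q + 2 - (q + 1 + 1) = 0 from by omega,
        show List.range' (q+1) 1 = [q+1] from rfl, List.range'_zero,
        List.foldl_cons, List.foldl_nil, List.foldl_nil,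
        stepA_skip q (q+1) _ (by omega) (by omega)]
      simp [solve_alt]
    | [a, b, c] =>
      simp only [List.length_cons, List.length_nil]
      rw [show List.range' q 3 = [q, q+1, q+2] from rfl]
      simp only [outerA, List.foldl_cons, List.foldl_nil]
      rw [show q + 3 - (q + 1) = 2 from by omega,
        show q + 3 - (q + 1 + 1) = 1 from by omega,
        show q + 3 - (q + 2 + 1) = 0 from by omega,
        show List.range' (q+1) 2 = [q+1, q+2] from rfl,
        show List.range' (q+2) 1 = [q+2] from rfl, List.range'_zero]
      simp only [List.foldl_cons, List.foldl_nil]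
      have h1 : stepA q (p ++ [a, b, c], v) (q+1) = (p ++ [a, b, c], v) :=
        stepA_skip q (q+1) _ (by omega) (by omega)
      have h2 : stepA q (p ++ [a, b, c], v) (q+2)
          = (pySwap (p ++ [a, b, c]) q (q+2), v ++ [q, q+2]) :=
        stepA_swap q (q+2) _ (by omega) hm0 hm2
      rw [h1, h2]
      have h3 : stepA (q+1) (pySwap (p ++ [a, b, c]) q (q+2), v ++ [q, q+2]) (q+2)
          = (pySwap (p ++ [a, b, c]) q (q+2), v ++ [q, q+2]) :=
        stepA_skip (q+1) (q+2) _ (by omega) (by omega)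
      rw [h3]
      have hs : pySwap (p ++ [a, b, c]) q (q+2) = p ++ [c, b, a] := by
        subst hq
        have := pySwap_shift p [a, b, c] 0 2
        simpa [pySwap] using this
      rw [hs]
      simp [solve_alt]
    | a :: b :: c :: d :: rest =>
      have hlen : rest.length < m := by
        simp only [List.length_cons] at hm; omega
      simp only [List.length_cons]
      rw [show rest.length + 1 + 1 + 1 + 1 = rest.length + 4 from by omega]
      rw [show List.range' q (rest.length + 4)
            = q :: (q+1) :: (q+2) :: (q+3) :: List.range' (q+4) rest.length from rfl]
      simp only [outerA, List.foldl_cons]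
      rw [show q+1+1 = q+2 from by omega, show q+2+1 = q+3 from by omega,
        show q+3+1 = q+4 from by omega,
        show q + (rest.length + 4) - (q+1) = rest.length + 3 from by omega,
        show q + (rest.length + 4) - (q+2) = rest.length + 2 from by omega,
        show q + (rest.length + 4) - (q+3) = rest.length + 1 from by omega,
        show q + (rest.length + 4) - (q+4) = rest.length from by omega,
        show List.range' (q+1) (rest.length + 3)
            = (q+1) :: (q+2) :: List.range' (q+3) (rest.length + 1) from rfl,
        show List.range' (q+2) (rest.length + 2)
            = (q+2) :: (q+3) :: List.range' (q+4) rest.length from rfl]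
      simp only [List.foldl_cons]
      -- i = q : skip j = q+1, swap at j = q+2, then i is visited
      have h1 : stepA q (p ++ (a :: b :: c :: d :: rest), v) (q+1)
          = (p ++ (a :: b :: c :: d :: rest), v) :=
        stepA_skip q (q+1) _ (by omega) (by omega)
      have h2 : stepA q (p ++ (a :: b :: c :: d :: rest), v) (q+2)
          = (pySwap (p ++ (a :: b :: c :: d :: rest)) q (q+2), v ++ [q, q+2]) :=
        stepA_swap q (q+2) _ (by omega) hm0 hm2
      rw [h1, h2]
      have h3 := inner_id q (rest.length + 1) (q+3)
        (pySwap (p ++ (a :: b :: c :: d :: rest)) q (q+2), v ++ [q, q+2]) (by simp)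
      rw [h3]
      -- i = q+1 : skip j = q+2, swap at j = q+3, then i is visited
      have h4 : stepA (q+1) (pySwap (p ++ (a :: b :: c :: d :: rest)) q (q+2), v ++ [q, q+2]) (q+2)
          = (pySwap (p ++ (a :: b :: c :: d :: rest)) q (q+2), v ++ [q, q+2]) :=
        stepA_skip (q+1) (q+2) _ (by omega) (by omega)
      rw [h4]
      have hnm1 : q + 1 ∉ v ++ [q, q+2] := by
        intro h
        rcases List.mem_append.mp h with h | h
        · exact absurd ((hv _).mp h) (by omega)
        · simp only [List.mem_cons, List.not_mem_nil, or_false] at h; omega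
      have hnm3 : q + 3 ∉ v ++ [q, q+2] := by
        intro h
        rcases List.mem_append.mp h with h | h
        · exact absurd ((hv _).mp h) (by omega)
        · simp only [List.mem_cons, List.not_mem_nil, or_false] at h; omega
      have h5 : stepA (q+1) (pySwap (p ++ (a :: b :: c :: d :: rest)) q (q+2), v ++ [q, q+2]) (q+3)
          = (pySwap (pySwap (p ++ (a :: b :: c :: d :: rest)) q (q+2)) (q+1) (q+3),
             (v ++ [q, q+2]) ++ [q+1, q+3]) :=
        stepA_swap (q+1) (q+3) _ (by omega) hnm1 hnm3
      rw [h5]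
      have h6 := inner_id (q+1) rest.length (q+4)
        (pySwap (pySwap (p ++ (a :: b :: c :: d :: rest)) q (q+2)) (q+1) (q+3),
         (v ++ [q, q+2]) ++ [q+1, q+3]) (by simp)
      rw [h6]
      -- i = q+2 and i = q+3 are visited: their whole inner loops do nothing
      have h7 := inner_id (q+2) (rest.length + 1) (q+3)
        (pySwap (pySwap (p ++ (a :: b :: c :: d :: rest)) q (q+2)) (q+1) (q+3),
         (v ++ [q, q+2]) ++ [q+1, q+3]) (by simp)
      rw [h7]
      have h8 := inner_id (q+3) rest.length (q+4)
        (pySwap (pySwap (p ++ (a :: b :: c :: d :: rest)) q (q+2)) (q+1) (q+3),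
         (v ++ [q, q+2]) ++ [q+1, q+3]) (by simp)
      rw [h8]
      -- compute the two swaps
      have hs1 : pySwap (p ++ (a :: b :: c :: d :: rest)) q (q+2)
          = p ++ (c :: b :: a :: d :: rest) := by
        subst hq
        have := pySwap_shift p (a :: b :: c :: d :: rest) 0 2
        simpa [pySwap] using this
      have hs2 : pySwap (p ++ (c :: b :: a :: d :: rest)) (q+1) (q+3)
          = p ++ (c :: d :: a :: b :: rest) := by
        subst hq
        have := pySwap_shift p (c :: b :: a :: d :: rest) 1 3
        simpa [pySwap] using this
      rw [hs1, hs2]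
      -- recurse on rest with p' = p ++ [c, d, a, b]
      have hrec := ih rest.length hlen rest (p ++ [c, d, a, b])
        ((v ++ [q, q+2]) ++ [q+1, q+3]) (q+4) rfl
        (by simp; omega) (by omega)
        (by intro x
            simp only [List.mem_append, List.mem_cons, List.not_mem_nil, or_false, hv x]
            omega)
      rw [show (p ++ [c, d, a, b]) ++ rest = p ++ (c :: d :: a :: b :: rest) from by simp] at hrec
      rw [show q + 4 + rest.length = q + (rest.length + 4) from by omega] at hrec
      simp only [outerA] at hrec
      rw [hrec]
      simp [solve_alt]

-- ===== VERDICT (by name: the statement is the Claim_ definition above) =====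
theorem solve_spec : Claim_equal_solve := by
  intro nums _
  unfold Spec_solve solve
  have h := mainA nums.length nums [] [] 0 rfl rfl (by omega) (by simp)
  rw [List.range_eq_range']
  simp only [List.nil_append, Nat.zero_add] at h
  rw [h]
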